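-- pv_equiv track=rewrite | github.com/EKGF/ekg-catalog | docs/main.py | _remove_diagram_tags
-- ===== SOURCE A (Python) =====
-- def _remove_diagram_tags(body: str) -> str:
--     """Remove PlantUML diagram object tags from markdown body (diagrams are injected by template)."""
--     lines = body.splitlines()
--     filtered = []
--     i = 0
--     while i < len(lines):
--         line = lines[i].strip()
--         # Remove <object> tags that reference diagrams/out/*.svg
--         if line.startswith("<object") and "diagrams/out" in line and ".svg" in line:
--             # Skip until closing </object> tag
--             while i < len(lines) and "</object>" not in lines[i]:
--                 i += 1
--             if i < len(lines) and "</object>" in lines[i]: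
--                 i += 1
--             continue
--         filtered.append(lines[i])
--         i += 1
--     return "\n".join(filtered)
-- ===== SOURCE B (Python) =====
-- def _remove_diagram_tags(body: str) -> str:
--     """Remove PlantUML diagram object tags from markdown body (diagrams are injected by template)."""
--     def _is_open(line):
--         s = line.strip()
--         return s.startswith("<object") and "diagrams/out" in s and ".svg" in s
--
--     def _strip_blocks(lines):
--         k = next((i for i, l in enumerate(lines) if _is_open(l)), None)
--         if k is None:
--             return lines
--         c = next((j for j in range(k, len(lines)) if "</object>" in lines[j]), None)
--         tail = [] if c is None else lines[c + 1:]
--         return lines[:k] + _strip_blocks(tail)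
--
--     return "\n".join(_strip_blocks(body.splitlines()))
-- ===== Notes on version B (the rewrite author's own statement) =====
-- stated objective: alternative
-- what changed: Replaced A's element-wise state-machine scan (index loop with a nested skip-ahead while) by a block-structured recursion: search for the next opening tag and its closing line, keep the whole prefix by slicing, and recurse on the tail after the block.
import Mathlib
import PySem

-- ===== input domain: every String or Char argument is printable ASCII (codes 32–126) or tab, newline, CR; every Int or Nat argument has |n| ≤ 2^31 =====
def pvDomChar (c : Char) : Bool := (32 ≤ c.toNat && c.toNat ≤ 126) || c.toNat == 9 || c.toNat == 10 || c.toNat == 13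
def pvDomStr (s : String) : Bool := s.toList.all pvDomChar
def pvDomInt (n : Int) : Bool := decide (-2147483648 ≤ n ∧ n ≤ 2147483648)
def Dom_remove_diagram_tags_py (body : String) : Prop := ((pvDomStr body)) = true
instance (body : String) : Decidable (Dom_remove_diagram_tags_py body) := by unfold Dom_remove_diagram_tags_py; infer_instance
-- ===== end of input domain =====

-- B replaces A's element-wise index loop (with a nested skip-ahead while) by a
-- block-structured recursion: find the next opening tag and its closing line,
-- keep the prefix by slicing, recurse on the tail (objective: alternative).

-- the tests both Pythons write literally:
-- line.strip().startswith("<object") and "diagrams/out" in … and ".svg" in …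
def pvIsObjectTag (stripped : String) : Bool :=
  PySem.Str.startswith stripped "<object" && PySem.Str.isIn "diagrams/out" stripped
    && PySem.Str.isIn ".svg" stripped
-- "</object>" in line
def pvHasClose (line : String) : Bool := PySem.Str.isIn "</object>" line
-- _is_open(line) of B / the open-tag test of A
def pvIsOpen (line : String) : Bool := pvIsObjectTag (PySem.Str.strip line)

-- ===== PORT A =====
-- inner while + the following 'if': skip lines until (and including) the first
-- line containing "</object>"
def pvSkipA (lines : List String) : List String :=
  match lines with
  | [] => []
  | l :: rest => if pvHasClose l then rest else pvSkipA rest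

theorem pvSkipA_length_le : ∀ (xs : List String), (pvSkipA xs).length ≤ xs.length := by
  intro xs
  induction xs with
  | nil => simp [pvSkipA]
  | cons l rest ih =>
    simp only [pvSkipA]
    split
    · simp
    · exact Nat.le_succ_of_le ih

-- the outer while over the remaining lines
def pvLoopA (lines : List String) : List String :=
  match lines with
  | [] => []
  | l :: rest =>
    if pvIsOpen l then
      pvLoopA (pvSkipA (l :: rest))
    else
      l :: pvLoopA rest
termination_by lines.length
decreasing_by
  · simp only [pvSkipA]
    split
    · simp
    · exact Nat.lt_succ_of_le (pvSkipA_length_le rest)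
  · simp

def remove_diagram_tags_py (body : String) : String :=
  PySem.Str.join "\n" (pvLoopA (PySem.Str.splitlines body))

-- ===== PORT B =====
-- next((i for i, l in enumerate(lines) if p(l)), None)
def pvFind (p : String → Bool) : List String → Option Nat
  | [] => none
  | l :: rest => if p l then some 0 else (pvFind p rest).map (· + 1)

theorem pvFind_some_lt {p : String → Bool} :
    ∀ {xs : List String} {k : Nat}, pvFind p xs = some k → k < xs.length := by
  intro xs
  induction xs with
  | nil => intro k h; simp [pvFind] at h
  | cons l rest ih =>
    intro k h
    simp only [pvFind] at h
    split at h
    · cases h; simp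
    · cases hr : pvFind p rest with
      | none => rw [hr] at h; simp at h
      | some j =>
        rw [hr] at h; simp at h
        have := ih hr
        simp; omega

-- _strip_blocks(lines): keep everything before the first opening tag, drop
-- through the first closing line at or after it, recurse on the rest
def pvGoB (lines : List String) : List String :=
  match h : pvFind pvIsOpen lines with
  | none => lines
  | some k =>
    lines.take k ++
      pvGoB (match pvFind pvHasClose (lines.drop k) with
             | none => []
             | some j => lines.drop (k + j + 1))
termination_by lines.length
decreasing_by
  have hk := pvFind_some_lt h
  split
  · simp only [List.length_nil]; omega
  · simp only [List.length_drop]; omega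

def remove_diagram_tags_py_alt (body : String) : String :=
  PySem.Str.join "\n" (pvGoB (PySem.Str.splitlines body))

-- ===== PRECONDITION & SPEC =====
def Spec_remove_diagram_tags_py (body : String) (out : String) : Prop := out = remove_diagram_tags_py_alt body
instance (body : String) (out : String) : Decidable (Spec_remove_diagram_tags_py body out) := by unfold Spec_remove_diagram_tags_py; infer_instance

-- ===== CLAIM (what is proved, stated in full; the proofs are below) =====
def Claim_equal_remove_diagram_tags_py : Prop := ∀ (body : String), Dom_remove_diagram_tags_py body → Spec_remove_diagram_tags_py body (remove_diagram_tags_py body)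

-- ===== LEMMAS AND PROOFS =====

-- no open line ⇒ A keeps everything
theorem pvLoopA_no_open : ∀ (xs : List String),
    pvFind pvIsOpen xs = none → pvLoopA xs = xs := by
  intro xs
  induction xs with
  | nil => intro _; rw [pvLoopA]
  | cons l rest ih =>
    intro h
    simp only [pvFind] at h
    split at h
    · simp at h
    · rw [pvLoopA, if_neg (by simp_all)]
      cases hr : pvFind pvIsOpen rest with
      | none => rw [ih hr]
      | some j => rw [hr] at h; simp at h

-- first open line at k ⇒ A keeps the prefix and skips from k onward
theorem pvLoopA_open_at : ∀ (xs : List String) (k : Nat),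
    pvFind pvIsOpen xs = some k →
    pvLoopA xs = xs.take k ++ pvLoopA (pvSkipA (xs.drop k)) := by
  intro xs
  induction xs with
  | nil => intro k h; simp [pvFind] at h
  | cons l rest ih =>
    intro k h
    simp only [pvFind] at h
    split at h
    · cases h
      rw [pvLoopA, if_pos (by assumption)]
      simp
    · cases hr : pvFind pvIsOpen rest with
      | none => rw [hr] at h; simp at h
      | some j =>
        rw [hr] at h; simp at h
        subst h
        rw [pvLoopA, if_neg (by simp_all), ih j hr]
        simp

-- A's skip-ahead equals "drop through the first closing line"
theorem pvSkipA_eq_find : ∀ (xs : List String),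
    pvSkipA xs = (match pvFind pvHasClose xs with
                  | none => []
                  | some j => xs.drop (j + 1)) := by
  intro xs
  induction xs with
  | nil => simp [pvSkipA, pvFind]
  | cons l rest ih =>
    simp only [pvSkipA, pvFind]
    split
    · simp
    · rw [ih]
      cases hr : pvFind pvHasClose rest <;> simp

-- main equivalence of the two loop shapes
theorem pvLoopA_eq_pvGoB : ∀ (n : Nat) (xs : List String), xs.length ≤ n →
    pvLoopA xs = pvGoB xs := by
  intro n
  induction n with
  | zero =>
    intro xs h
    have : xs = [] := List.eq_nil_of_length_eq_zero (Nat.le_zero.mp h)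
    subst this
    rw [pvLoopA, pvGoB]
    simp [pvFind]
  | succ n ih =>
    intro xs h
    rw [pvGoB]
    cases hf : pvFind pvIsOpen xs with
    | none => exact pvLoopA_no_open xs hf
    | some k =>
      have hk := pvFind_some_lt hf
      rw [pvLoopA_open_at xs k hf, pvSkipA_eq_find]
      congr 1
      cases hc : pvFind pvHasClose (xs.drop k) with
      | none => dsimp only; exact ih [] (by simp)
      | some j =>
        dsimp only
        rw [List.drop_drop, show k + (j + 1) = k + j + 1 by omega]
        exact ih (xs.drop (k + j + 1)) (by simp; omega)

-- ===== VERDICT (by name: the statement is the Claim_ definition above) =====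
theorem remove_diagram_tags_py_spec : Claim_equal_remove_diagram_tags_py := by
  intro body _
  unfold Spec_remove_diagram_tags_py remove_diagram_tags_py remove_diagram_tags_py_alt
  rw [pvLoopA_eq_pvGoB (PySem.Str.splitlines body).length _ le_rfl]
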